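-- pv_equiv track=rewrite | github.com/chilltse/moveback | datasets/data_loader.py | calculate_pcount_seq
-- ===== SOURCE A (Python) =====
-- def calculate_pcount_seq(concepts):
--     """
--     For each position in a single sequence, count items since LAST occurrence of same concept.
--
--     Args:
--         concepts: List of concept IDs for one sequence
--
--     Returns:
--         pcount: List of count values with same length as concepts
--     """
--     seq_len = len(concepts)
--     pcount = [0] * seq_len
--     concept_last_pos = {}
--
--     for i in range(seq_len):
--         concept = concepts[i]
--         if concept == -1:  # Skip padding
--             pcount[i] = 0
--             continue
--         if concept in concept_last_pos:
--             pcount[i] = i - concept_last_pos[concept]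
--         else:
--             pcount[i] = 0  # First occurrence
--         concept_last_pos[concept] = i
--
--     return pcount
-- ===== SOURCE B (Python) =====
-- def calculate_pcount_seq(concepts):
--     """
--     For each position in a single sequence, count items since LAST occurrence of same concept.
--
--     Dict-free re-implementation: for each position scan backwards for the previous
--     occurrence of the same concept; -1 padding and first occurrences give 0.
--     """
--     pcount = []
--     for i, c in enumerate(concepts):
--         val = 0
--         if c != -1:
--             for j in range(i - 1, -1, -1):
--                 if concepts[j] == c:
--                     val = i - j
--                     break
--         pcount.append(val)
--     return pcount
-- ===== Notes on version B (the rewrite author's own statement) =====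
-- stated objective: simpler
-- what changed: Replaces the dict of last-seen positions by a direct backward scan from each position for the previous equal concept (dict-free, output built by append), trading A's linear time for a shorter quadratic scan.
import Mathlib
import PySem

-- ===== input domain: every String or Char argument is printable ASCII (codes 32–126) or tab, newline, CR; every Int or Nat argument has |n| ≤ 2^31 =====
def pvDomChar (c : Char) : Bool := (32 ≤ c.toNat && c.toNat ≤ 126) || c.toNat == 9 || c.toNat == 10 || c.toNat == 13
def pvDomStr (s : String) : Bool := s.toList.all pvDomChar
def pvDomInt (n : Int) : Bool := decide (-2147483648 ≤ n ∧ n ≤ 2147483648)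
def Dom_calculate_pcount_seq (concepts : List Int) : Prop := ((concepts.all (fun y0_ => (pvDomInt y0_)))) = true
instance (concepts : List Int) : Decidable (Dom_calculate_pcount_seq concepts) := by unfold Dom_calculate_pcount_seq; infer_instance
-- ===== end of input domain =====

-- B replaces A's dict of last-seen positions by a direct backward scan per position: shorter and dict-free, at quadratic instead of linear cost; equivalence proved on all inputs.

-- ===== PORT A =====
-- single forward pass keeping pcount (preallocated zeros) and the dict concept ↦ last position
def calculate_pcount_seq (concepts : List Int) : List Int :=
  let seq_len := concepts.length
  let r := (List.range seq_len).foldl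
    (fun (st : List Int × PySem.Dict Int Int) i =>
      let concept := concepts.getD i 0   -- concepts[i]; i < seq_len so always in range
      if concept = -1 then (st.1.set i 0, st.2)   -- skip padding
      else
        let v : Int :=
          match st.2.get? concept with
          | some j => (i : Int) - j
          | none => 0                              -- first occurrence
        (st.1.set i v, st.2.insert concept (i : Int)))
    (List.replicate seq_len 0, PySem.Dict.empty)
  r.1

-- ===== PORT B =====
-- the inner 'for j in range(i-1, -1, -1): … break' loop of Source B: largest j < i with concepts[j] = c
def pvFindBack (concepts : List Int) (c : Int) : Nat → Option Nat
  | 0 => none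
  | j + 1 => if concepts.getD j 0 = c then some j else pvFindBack concepts c j

def calculate_pcount_seq_alt (concepts : List Int) : List Int :=
  (List.range concepts.length).map (fun i =>
    let c := concepts.getD i 0
    if c = -1 then 0
    else
      match pvFindBack concepts c i with
      | some j => (i : Int) - (j : Int)
      | none => 0)

-- ===== PRECONDITION & SPEC =====
def Spec_calculate_pcount_seq (concepts : List Int) (out : List Int) : Prop := out = calculate_pcount_seq_alt concepts
instance (concepts : List Int) (out : List Int) : Decidable (Spec_calculate_pcount_seq concepts out) := by unfold Spec_calculate_pcount_seq; infer_instance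

-- ===== CLAIM (what is proved, stated in full; the proofs are below) =====
def Claim_equal_calculate_pcount_seq : Prop := ∀ (concepts : List Int), Dom_calculate_pcount_seq concepts → Spec_calculate_pcount_seq concepts (calculate_pcount_seq concepts)

-- ===== LEMMAS AND PROOFS =====

-- the value B computes at position i (let-free restatement of B's map body)
def pvValAt (concepts : List Int) (i : Nat) : Int :=
  if concepts.getD i 0 = -1 then 0
  else
    match pvFindBack concepts (concepts.getD i 0) i with
    | some j => (i : Int) - (j : Int)
    | none => 0

lemma pvSetMapRange (n k : Nat) (f g : Nat → Int) (x : Int)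
    (hx : g k = x) (hg : ∀ i, i ≠ k → g i = f i) :
    ((List.range n).map f).set k x = (List.range n).map g := by
  apply List.ext_getElem
  · simp
  · intro i h1 h2
    simp only [List.getElem_set, List.getElem_map, List.getElem_range]
    by_cases hik : k = i
    · subst hik; simp [hx]
    · simp [hik, hg i (fun h => hik h.symm)]

lemma pvFindBack_succ_of_ne (concepts : List Int) (c : Int) (k : Nat)
    (h : concepts.getD k 0 ≠ c) :
    pvFindBack concepts c (k + 1) = pvFindBack concepts c k := by
  simp only [pvFindBack, if_neg h]

-- the loop body of A's port, named for the invariant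
def pvStepA (concepts : List Int) (st : List Int × PySem.Dict Int Int) (i : Nat) :
    List Int × PySem.Dict Int Int :=
  if concepts.getD i 0 = -1 then (st.1.set i 0, st.2)
  else
    (st.1.set i
      (match st.2.get? (concepts.getD i 0) with
       | some j => (i : Int) - j
       | none => 0),
     st.2.insert (concepts.getD i 0) (i : Int))

-- loop invariant for A's fold over range k
lemma pvInv (concepts : List Int) (k : Nat) :
    ((List.range k).foldl (pvStepA concepts)
      (List.replicate concepts.length 0, PySem.Dict.empty)).1
      = (List.range concepts.length).map (fun i => if i < k then pvValAt concepts i else 0)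
    ∧ (∀ c : Int, c ≠ -1 →
        ((List.range k).foldl (pvStepA concepts)
          (List.replicate concepts.length 0, PySem.Dict.empty)).2.get? c
          = (pvFindBack concepts c k).map (fun j => (j : Int)))
    ∧ ((List.range k).foldl (pvStepA concepts)
        (List.replicate concepts.length 0, PySem.Dict.empty)).2.get? (-1) = none := by
  induction k with
  | zero =>
    refine ⟨?_, ?_, ?_⟩
    · apply List.ext_getElem <;> simp
    · intro c _; simp [pvFindBack, PySem.Dict.get?_empty]
    · simp [PySem.Dict.get?_empty]
  | succ k ih =>
    obtain ⟨ih1, ih2, ih3⟩ := ih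
    rw [List.range_succ, List.foldl_append, List.foldl_cons, List.foldl_nil]
    set st := (List.range k).foldl (pvStepA concepts)
      (List.replicate concepts.length 0, PySem.Dict.empty) with hst
    by_cases hpad : concepts.getD k 0 = -1
    · -- padding step: pcount[k] := 0, dict unchanged
      rw [pvStepA]
      rw [if_pos hpad]
      refine ⟨?_, ?_, ?_⟩
      · rw [ih1]
        apply pvSetMapRange
        · have hv : pvValAt concepts k = 0 := by rw [pvValAt, if_pos hpad]
          simp [hv]
        · intro i hik
          by_cases h : i < k
          · simp [h, Nat.lt_succ_of_lt h]
          · have h2 : ¬ i < k + 1 := by omega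
            simp [h, h2]
      · intro c hc
        rw [ih2 c hc, pvFindBack_succ_of_ne concepts c k (by rw [hpad]; exact fun h => hc h.symm)]
      · exact ih3
    · -- real concept step: pcount[k] from the dict, dict[concept] := k
      rw [pvStepA]
      rw [if_neg hpad]
      refine ⟨?_, ?_, ?_⟩
      · rw [ih1]
        apply pvSetMapRange
        · have hv : pvValAt concepts k
              = (match st.2.get? (concepts.getD k 0) with
                 | some j => (k : Int) - j
                 | none => 0) := by
            rw [pvValAt, if_neg hpad, ih2 _ hpad]
            cases pvFindBack concepts (concepts.getD k 0) k <;> simp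
          simp [hv]
        · intro i hik
          by_cases h : i < k
          · simp [h, Nat.lt_succ_of_lt h]
          · have h2 : ¬ i < k + 1 := by omega
            simp [h, h2]
      · intro c hc
        rw [PySem.Dict.get?_insert]
        by_cases hcc : c = concepts.getD k 0
        · rw [if_pos hcc]
          have hfb : pvFindBack concepts c (k + 1) = some k := by
            simp only [pvFindBack]
            rw [if_pos hcc.symm]
          rw [hfb]
          simp
        · rw [if_neg hcc, ih2 c hc,
            pvFindBack_succ_of_ne concepts c k (fun h => hcc h.symm)]
      · dsimp only
        rw [PySem.Dict.get?_insert, if_neg (Ne.symm hpad)]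
        exact ih3

-- ===== VERDICT (by name: the statement is the Claim_ definition above) =====
theorem calculate_pcount_seq_spec : Claim_equal_calculate_pcount_seq := by
  intro concepts _
  unfold Spec_calculate_pcount_seq calculate_pcount_seq calculate_pcount_seq_alt
  have h := (pvInv concepts concepts.length).1
  have hfold : (fun (st : List Int × PySem.Dict Int Int) (i : Nat) =>
      let concept := concepts.getD i 0
      if concept = -1 then (st.1.set i 0, st.2)
      else
        let v : Int :=
          match st.2.get? concept with
          | some j => (i : Int) - j
          | none => 0
        (st.1.set i v, st.2.insert concept (i : Int))) = pvStepA concepts := rfl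
  rw [hfold, h]
  apply List.map_congr_left
  intro i hi
  have hlt : i < concepts.length := List.mem_range.mp hi
  simp only [if_pos hlt]
  rw [pvValAt]
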